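-- pv_equiv track=rewrite | github.com/atefkbenothman/aoc-2023 | day_13/main.py | validate_horizontal_reflection
-- ===== SOURCE A (Python) =====
-- def validate_horizontal_reflection(pattern: list[str], row1: int, row2: int) -> bool:
--   """
--   given two starting rows, expand outward to check to see if
--   neighbor rows are equal
--   """
--   rows = len(pattern)
--   is_valid = True
--   first_row, last_row = row1, row2
--   while first_row in range(rows) and last_row in range(rows):
--     if pattern[first_row] != pattern[last_row]:
--       is_valid = False
--       break
--     first_row -= 1
--     last_row += 1
--   return is_valid
-- ===== SOURCE B (Python) =====
-- def validate_horizontal_reflection(pattern: list[str], row1: int, row2: int) -> bool: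
--   """
--   given two starting rows, expand outward to check to see if
--   neighbor rows are equal
--   """
--   rows = len(pattern)
--   if not (0 <= row1 < rows and 0 <= row2 < rows):
--     return True
--   top = pattern[:row1 + 1][::-1]
--   bottom = pattern[row2:]
--   m = min(len(top), len(bottom))
--   return top[:m] == bottom[:m]
-- ===== Notes on version B (the rewrite author's own statement) =====
-- stated objective: alternative
-- what changed: Replaces A's expanding two-pointer while-loop with break by slicing: reverse the prefix ending at row1, take the suffix from row2, truncate both to the common length and compare the two lists wholesale with ==; no index loop or per-step bounds check remains.
import Mathlib
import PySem

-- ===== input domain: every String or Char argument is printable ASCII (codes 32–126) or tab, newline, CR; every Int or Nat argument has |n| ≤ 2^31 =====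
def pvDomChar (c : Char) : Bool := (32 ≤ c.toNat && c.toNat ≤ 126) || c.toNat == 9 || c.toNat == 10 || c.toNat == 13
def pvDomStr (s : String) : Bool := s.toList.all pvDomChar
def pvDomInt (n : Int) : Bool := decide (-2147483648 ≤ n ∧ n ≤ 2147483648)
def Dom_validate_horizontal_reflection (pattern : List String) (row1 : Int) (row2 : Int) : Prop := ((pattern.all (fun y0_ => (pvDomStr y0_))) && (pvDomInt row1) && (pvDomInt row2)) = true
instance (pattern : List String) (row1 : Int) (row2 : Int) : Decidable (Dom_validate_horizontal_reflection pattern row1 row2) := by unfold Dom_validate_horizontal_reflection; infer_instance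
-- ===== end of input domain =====

-- B replaces A's expanding two-pointer while-loop-with-break by slicing: reverse the
-- prefix ending at row1, take the suffix from row2, truncate both to the common length
-- and compare the two lists wholesale (objective: alternative decomposition, no index loop).

-- ===== PORT A =====
-- A's while loop: state (first_row, last_row, is_valid); the loop runs at most
-- (row1+1).toNat times because first_row strictly decreases and must stay ≥ 0,
-- so that fuel makes the literal transliteration total (fuel 0 is unreachable).
def vhrLoop (pattern : List String) (firstRow lastRow : Int) : Nat → Bool
  | 0 => true
  | fuel+1 =>
    let rows : Int := pattern.length
    if 0 ≤ firstRow ∧ firstRow < rows ∧ 0 ≤ lastRow ∧ lastRow < rows then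
      if PySem.List.pyGet? pattern firstRow ≠ PySem.List.pyGet? pattern lastRow then false
      else vhrLoop pattern (firstRow - 1) (lastRow + 1) fuel
    else true

def validate_horizontal_reflection (pattern : List String) (row1 : Int) (row2 : Int) : Bool :=
  vhrLoop pattern row1 row2 (row1 + 1).toNat

-- ===== PORT B =====
-- pattern[:row1+1][::-1] is ported as slice … |>.reverse (PySem: [::-1] IS reverse,
-- lemma slice?_none_none_neg_one); the rest follows Source B line by line.
def validate_horizontal_reflection_alt (pattern : List String) (row1 : Int) (row2 : Int) : Bool :=
  let rows : Int := pattern.length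
  if 0 ≤ row1 ∧ row1 < rows ∧ 0 ≤ row2 ∧ row2 < rows then
    let top := (PySem.List.slice pattern none (some (row1 + 1))).reverse
    let bottom := PySem.List.slice pattern (some row2) none
    let m : Int := min (top.length : Int) (bottom.length : Int)
    PySem.List.slice top none (some m) == PySem.List.slice bottom none (some m)
  else true

-- ===== PRECONDITION & SPEC =====
def Spec_validate_horizontal_reflection (pattern : List String) (row1 : Int) (row2 : Int) (out : Bool) : Prop := out = validate_horizontal_reflection_alt pattern row1 row2
instance (pattern : List String) (row1 : Int) (row2 : Int) (out : Bool) : Decidable (Spec_validate_horizontal_reflection pattern row1 row2 out) := by unfold Spec_validate_horizontal_reflection; infer_instance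

-- ===== CLAIM (what is proved, stated in full; the proofs are below) =====
def Claim_equal_validate_horizontal_reflection : Prop := ∀ (pattern : List String) (row1 : Int) (row2 : Int), Dom_validate_horizontal_reflection pattern row1 row2 → Spec_validate_horizontal_reflection pattern row1 row2 (validate_horizontal_reflection pattern row1 row2)

-- ===== LEMMAS AND PROOFS =====

-- Nat-level normal form of B's comparison when both starting rows are in range.
def vhrNF (p : List String) (f l : Nat) : Bool :=
  let m := min (f + 1) (p.length - l)
  ((p.take (f + 1)).reverse.take m) == ((p.drop l).take m)

-- B's port equals the Nat normal form on in-range starting rows.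
lemma alt_eq_nf (p : List String) (first last : Int)
    (h1 : 0 ≤ first) (h2 : first < (p.length : Int)) (h3 : 0 ≤ last) (h4 : last < (p.length : Int)) :
    validate_horizontal_reflection_alt p first last = vhrNF p first.toNat last.toNat := by
  unfold validate_horizontal_reflection_alt vhrNF
  rw [if_pos ⟨h1, h2, h3, h4⟩]
  simp only [PySem.List.slice_to p (by omega : (0:Int) ≤ first + 1),
    PySem.List.slice_from p h3]
  have htop : (first + 1).toNat = first.toNat + 1 := by omega
  rw [htop]
  simp only [List.length_reverse, List.length_take, List.length_drop]
  have hmin1 : min (first.toNat + 1) p.length = first.toNat + 1 := by omega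
  rw [hmin1, ← Nat.cast_min]
  simp only [PySem.List.slice_to_natCast]

-- One expansion step of the normal form: peel off the shared head pair
-- (p[f] from the reversed prefix, p[l] from the suffix).
lemma nf_step (p : List String) (f l : Nat) (hf : f < p.length) (hl : l < p.length) :
    vhrNF p f l = ((p[f] == p[l]) &&
      (((p.take f).reverse.take (min f (p.length - (l + 1)))) ==
        ((p.drop (l + 1)).take (min f (p.length - (l + 1)))))) := by
  unfold vhrNF
  have hmin : min (f + 1) (p.length - l) = min f (p.length - (l + 1)) + 1 := by omega
  have htake : (p.take (f + 1)).reverse = p[f] :: (p.take f).reverse := by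
    rw [List.take_add_one]
    simp [List.getElem?_eq_getElem hf]
  have hdrop : p.drop l = p[l] :: p.drop (l + 1) := List.drop_eq_getElem_cons hl
  simp only [hmin, htake, hdrop, List.take_succ_cons, List.cons_beq_cons]

-- The out-of-range case: B returns true.
lemma alt_out (p : List String) (first last : Int)
    (h : ¬ (0 ≤ first ∧ first < (p.length : Int) ∧ 0 ≤ last ∧ last < (p.length : Int))) :
    validate_horizontal_reflection_alt p first last = true := by
  unfold validate_horizontal_reflection_alt
  rw [if_neg h]

-- A's loop with enough fuel computes B's answer.
lemma vhrLoop_eq_alt (p : List String) (first last : Int) (fuel : Nat)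
    (h : (first + 1).toNat ≤ fuel) :
    vhrLoop p first last fuel = validate_horizontal_reflection_alt p first last := by
  induction fuel generalizing first last with
  | zero =>
    have hf : first < 0 := by omega
    unfold vhrLoop
    rw [alt_out p first last (by omega)]
  | succ fuel ih =>
    simp only [vhrLoop]
    by_cases hg : 0 ≤ first ∧ first < (p.length : Int) ∧ 0 ≤ last ∧ last < (p.length : Int)
    · rw [if_pos hg]
      obtain ⟨h1, h2, h3, h4⟩ := hg
      have hfn : first.toNat < p.length := by omega
      have hln : last.toNat < p.length := by omega
      have hget1 : PySem.List.pyGet? p first = some p[first.toNat] := by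
        simp [PySem.List.pyGet?, PySem.List.pyIdx?, h1, h2]
      have hget2 : PySem.List.pyGet? p last = some p[last.toNat] := by
        simp [PySem.List.pyGet?, PySem.List.pyIdx?, h3, h4]
      rw [alt_eq_nf p first last h1 h2 h3 h4, nf_step p first.toNat last.toNat hfn hln]
      by_cases hne : PySem.List.pyGet? p first ≠ PySem.List.pyGet? p last
      · rw [if_pos hne]
        rw [hget1, hget2] at hne
        have : (p[first.toNat] == p[last.toNat]) = false := by
          simp only [beq_eq_false_iff_ne]
          intro hcontr; exact hne (by rw [hcontr])
        rw [this, Bool.false_and]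
      · rw [if_neg hne]
        push Not at hne
        rw [hget1, hget2] at hne
        have heq : p[first.toNat] = p[last.toNat] := by injection hne
        rw [heq]
        simp only [BEq.rfl, Bool.true_and]
        rw [ih (first - 1) (last + 1) (by omega)]
        by_cases hg' : 0 ≤ first - 1 ∧ last + 1 < (p.length : Int)
        · rw [alt_eq_nf p (first - 1) (last + 1) hg'.1 (by omega) (by omega) hg'.2]
          unfold vhrNF
          have e1 : (first - 1).toNat + 1 = first.toNat := by omega
          have e2 : (last + 1).toNat = last.toNat + 1 := by omega
          rw [e1, e2]
        · rw [alt_out p (first - 1) (last + 1) (by omega)]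
          -- not in range: either first = 0 or last + 1 = len, so the residual min is 0
          have h0 : min first.toNat (p.length - (last.toNat + 1)) = 0 := by omega
          rw [h0]
          simp
    · rw [if_neg hg, alt_out p first last hg]

-- ===== VERDICT (by name: the statement is the Claim_ definition above) =====
theorem validate_horizontal_reflection_spec : Claim_equal_validate_horizontal_reflection := by
  intro pattern row1 row2 _
  unfold Spec_validate_horizontal_reflection validate_horizontal_reflection
  exact vhrLoop_eq_alt pattern row1 row2 _ le_rfl
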